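-- pv_equiv track=rewrite | github.com/svaans/bot | core/monitor_estado_bot.py | _contar_rachas
-- ===== SOURCE A (Python) =====
-- def _contar_rachas(operaciones: list[dict]) -> tuple[int, int]:
--     """Calcula las rachas consecutivas de ganancias y pérdidas."""
--     ganancias = 0
--     perdidas = 0
--     for op in reversed(operaciones):
--         retorno = op.get('retorno_total', 0)
--         if retorno > 0 and perdidas == 0:
--             ganancias += 1
--         elif retorno < 0 and ganancias == 0:
--             perdidas += 1
--         else:
--             break
--     return ganancias, perdidas
-- ===== SOURCE B (Python) =====
-- def _leading(revops, pred):
--     """Index of the first operation (in the given order) whose retorno fails pred."""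
--     return next((i for i, op in enumerate(revops)
--                  if not pred(op.get('retorno_total', 0))), len(revops))
--
--
-- def _contar_rachas(operaciones):
--     rev = list(reversed(operaciones))
--     ganancias = _leading(rev, lambda r: r > 0)
--     if ganancias > 0:
--         return ganancias, 0
--     return 0, _leading(rev, lambda r: r < 0)
-- ===== Notes on version B (the rewrite author's own statement) =====
-- stated objective: idiomatic
-- what changed: Dispatches on the sign of the most recent return: counts the leading win-streak of the reversed list with a single-predicate first-failure scan, and only if that is zero counts the leading loss-streak, instead of one loop carrying two mutually-exclusive counters and a break.
import Mathlib
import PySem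

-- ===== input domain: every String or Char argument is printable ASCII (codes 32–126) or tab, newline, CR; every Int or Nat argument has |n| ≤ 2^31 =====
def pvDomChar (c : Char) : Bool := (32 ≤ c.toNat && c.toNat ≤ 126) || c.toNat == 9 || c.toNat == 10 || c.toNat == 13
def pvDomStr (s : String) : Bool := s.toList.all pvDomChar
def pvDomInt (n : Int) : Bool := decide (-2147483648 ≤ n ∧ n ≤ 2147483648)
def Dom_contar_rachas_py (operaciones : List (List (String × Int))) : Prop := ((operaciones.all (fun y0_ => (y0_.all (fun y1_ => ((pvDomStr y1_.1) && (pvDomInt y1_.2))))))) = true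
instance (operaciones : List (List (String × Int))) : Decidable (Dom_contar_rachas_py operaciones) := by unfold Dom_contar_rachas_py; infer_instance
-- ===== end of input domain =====

-- B counts the leading win-streak of the reversed list first and only falls back to the
-- loss-streak when it is zero, instead of A's single loop with two mutually-exclusive counters.

-- ===== PORT A =====
-- the for-loop over reversed(operaciones) with its break, carrying (ganancias, perdidas)
def contarRachasLoop : List (List (String × Int)) → Int → Int → Int × Int
  | [], ganancias, perdidas => (ganancias, perdidas)
  | op :: rest, ganancias, perdidas =>
    let retorno := PySem.Dict.getD (PySem.Dict.mk op) "retorno_total" 0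
    if retorno > 0 ∧ perdidas = 0 then contarRachasLoop rest (ganancias + 1) perdidas
    else if retorno < 0 ∧ ganancias = 0 then contarRachasLoop rest ganancias (perdidas + 1)
    else (ganancias, perdidas)

def contar_rachas_py (operaciones : List (List (String × Int))) : Int × Int :=
  contarRachasLoop operaciones.reverse 0 0

-- ===== PORT B =====
-- _leading: index of the first element failing the predicate, default the length
-- (exact port of next((i for i, op in enumerate(revops) if not pred(...)), len(revops)))
def leadingCount (pred : Int → Bool) : List (List (String × Int)) → Int
  | [] => 0
  | op :: rest =>
    if pred (PySem.Dict.getD (PySem.Dict.mk op) "retorno_total" 0) then 1 + leadingCount pred rest else 0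

def contar_rachas_py_alt (operaciones : List (List (String × Int))) : Int × Int :=
  let rev := operaciones.reverse
  let ganancias := leadingCount (fun r => r > 0) rev
  if ganancias > 0 then (ganancias, 0)
  else (0, leadingCount (fun r => r < 0) rev)

-- ===== PRECONDITION & SPEC =====
def Spec_contar_rachas_py (operaciones : List (List (String × Int))) (out : Int × Int) : Prop := out = contar_rachas_py_alt operaciones
instance (operaciones : List (List (String × Int))) (out : Int × Int) : Decidable (Spec_contar_rachas_py operaciones out) := by unfold Spec_contar_rachas_py; infer_instance

-- ===== CLAIM (what is proved, stated in full; the proofs are below) =====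
def Claim_equal_contar_rachas_py : Prop := ∀ (operaciones : List (List (String × Int))), Dom_contar_rachas_py operaciones → Spec_contar_rachas_py operaciones (contar_rachas_py operaciones)

-- ===== LEMMAS AND PROOFS =====

theorem leadingCount_nonneg (pred : Int → Bool) (l : List (List (String × Int))) :
    0 ≤ leadingCount pred l := by
  induction l with
  | nil => simp [leadingCount]
  | cons op rest ih =>
    simp only [leadingCount]
    split <;> omega

theorem loop_pos (l : List (List (String × Int))) :
    ∀ g : Int, 0 < g →
      contarRachasLoop l g 0 = (g + leadingCount (fun r => r > 0) l, 0) := by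
  induction l with
  | nil => intro g _; simp [contarRachasLoop, leadingCount]
  | cons op rest ih =>
    intro g hg
    simp only [contarRachasLoop, leadingCount]
    by_cases hp : PySem.Dict.getD (PySem.Dict.mk op) "retorno_total" 0 > 0
    · rw [if_pos ⟨hp, trivial⟩, ih (g + 1) (by omega)]
      simp only [hp, decide_true, if_true]
      rw [add_assoc]
    · rw [if_neg (by tauto), if_neg (by omega)]
      simp [hp]

theorem loop_neg (l : List (List (String × Int))) :
    ∀ p : Int, 0 < p →
      contarRachasLoop l 0 p = (0, p + leadingCount (fun r => r < 0) l) := by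
  induction l with
  | nil => intro p _; simp [contarRachasLoop, leadingCount]
  | cons op rest ih =>
    intro p hp
    simp only [contarRachasLoop, leadingCount]
    by_cases hn : PySem.Dict.getD (PySem.Dict.mk op) "retorno_total" 0 < 0
    · rw [if_neg (by omega), if_pos ⟨hn, trivial⟩, ih (p + 1) (by omega)]
      simp only [hn, decide_true, if_true]
      rw [add_assoc]
    · rw [if_neg (by omega), if_neg (by tauto)]
      simp [hn]

theorem loop_eq_alt (l : List (List (String × Int))) :
    contarRachasLoop l 0 0 =
      (let g := leadingCount (fun r => r > 0) l
       if g > 0 then (g, 0) else (0, leadingCount (fun r => r < 0) l)) := by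
  cases l with
  | nil => simp [contarRachasLoop, leadingCount]
  | cons op rest =>
    simp only [contarRachasLoop, leadingCount]
    by_cases hp : PySem.Dict.getD (PySem.Dict.mk op) "retorno_total" 0 > 0
    · rw [if_pos ⟨hp, trivial⟩]
      have h1 : (0 : Int) + 1 = 1 := by ring
      rw [h1, loop_pos rest 1 (by omega)]
      have hnn := leadingCount_nonneg (fun r => r > 0) rest
      simp only [hp, decide_true, if_true]
      rw [if_pos (by omega)]
    · rw [if_neg (by tauto)]
      by_cases hn : PySem.Dict.getD (PySem.Dict.mk op) "retorno_total" 0 < 0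
      · rw [if_pos ⟨hn, trivial⟩]
        have h1 : (0 : Int) + 1 = 1 := by ring
        rw [h1, loop_neg rest 1 (by omega)]
        simp [hp, hn]
      · rw [if_neg (by tauto)]
        simp [hp, hn]

-- ===== VERDICT (by name: the statement is the Claim_ definition above) =====
theorem contar_rachas_py_spec : Claim_equal_contar_rachas_py := by
  intro ops _
  unfold Spec_contar_rachas_py contar_rachas_py contar_rachas_py_alt
  exact loop_eq_alt ops.reverse
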